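-- pv_equiv track=rewrite | github.com/Mondego/pyreco | repoData/kmike-pymorphy2/allPythonContent.py | _get_duplicate_tag_replaces
-- ===== SOURCE A (Python) =====
-- def _get_duplicate_tag_replaces(spellings, skip_space_ambiguity):
--     replaces = {}
--     for grammemes in spellings:
--         tags = spellings[grammemes]
--         if _is_ambiguous(tags.keys(), skip_space_ambiguity):
--             items = sorted(tags.items(), key=lambda it: it[1], reverse=True)
--             top_tag = items[0][0]
--             for tag, count in items[1:]:
--                 replaces[tag] = top_tag
--     return replaces
--
-- def _is_ambiguous(tags, skip_space_ambiguity=True):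
--     """
--     >>> _is_ambiguous(['NOUN sing,masc'])
--     False
--     >>> _is_ambiguous(['NOUN sing,masc', 'NOUN masc,sing'])
--     True
--     >>> _is_ambiguous(['NOUN masc,sing', 'NOUN,masc sing'])
--     False
--     >>> _is_ambiguous(['NOUN masc,sing', 'NOUN,masc sing'], skip_space_ambiguity=False)
--     True
--     """
--     if len(tags) < 2:
--         return False
--
--     if skip_space_ambiguity:
--         # if space position differs then skip this ambiguity
--         # XXX: this doesn't handle cases when space position difference
--         # is not the only ambiguity
--         space_pos = [tag.index(' ') if ' ' in tag else None
--                      for tag in map(str, tags)]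
--         if len(space_pos) == len(set(space_pos)):
--             return False
--
--     return True
-- ===== SOURCE B (Python) =====
-- def _get_duplicate_tag_replaces(spellings, skip_space_ambiguity):
--     replaces = {}
--     for tags in spellings.values():
--         if _is_ambiguous(tags.keys(), skip_space_ambiguity):
--             remaining = list(tags.items())
--             # selection instead of sorting: repeatedly extract the first
--             # item with the largest count; the extraction order is exactly
--             # a stable descending sort of the items.
--             top_tag = _pop_first_max(remaining)[0]
--             while remaining:
--                 tag, _count = _pop_first_max(remaining)
--                 replaces[tag] = top_tag
--     return replaces
--
--
-- def _pop_first_max(items):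
--     """Remove and return the first item with the largest count."""
--     b = 0
--     for i in range(1, len(items)):
--         if items[i][1] > items[b][1]:
--             b = i
--     return items.pop(b)
--
--
-- def _is_ambiguous(tags, skip_space_ambiguity=True):
--     if len(tags) < 2:
--         return False
--
--     if skip_space_ambiguity:
--         # if space position differs then skip this ambiguity
--         space_pos = [tag.index(' ') if ' ' in tag else None
--                      for tag in map(str, tags)]
--         if len(space_pos) == len(set(space_pos)):
--             return False
--
--     return True
-- ===== Notes on version B (the rewrite author's own statement) =====
-- stated objective: alternative
-- what changed: Per ambiguous group, B replaces A's sort-by-count-descending-then-slice (sorted(..., key=count, reverse=True); items[1:]) by repeated extraction of the first item with the largest count (selection), and iterates the dict values directly instead of iterating keys and looking each one up.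
import Mathlib
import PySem

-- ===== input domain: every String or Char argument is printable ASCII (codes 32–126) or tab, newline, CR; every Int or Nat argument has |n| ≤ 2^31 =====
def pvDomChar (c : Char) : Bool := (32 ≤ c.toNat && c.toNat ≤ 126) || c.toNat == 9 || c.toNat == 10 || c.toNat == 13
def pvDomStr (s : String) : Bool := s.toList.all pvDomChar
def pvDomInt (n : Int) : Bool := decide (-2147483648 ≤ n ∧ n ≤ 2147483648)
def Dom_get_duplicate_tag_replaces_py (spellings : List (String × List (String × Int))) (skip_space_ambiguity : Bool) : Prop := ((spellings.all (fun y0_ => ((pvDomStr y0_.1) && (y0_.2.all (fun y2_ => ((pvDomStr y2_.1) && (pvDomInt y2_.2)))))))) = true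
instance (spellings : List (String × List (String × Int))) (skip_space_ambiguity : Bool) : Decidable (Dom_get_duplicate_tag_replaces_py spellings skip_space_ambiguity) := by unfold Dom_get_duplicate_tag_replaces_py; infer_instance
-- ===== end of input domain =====

-- B replaces A's per-group sort (sorted by count, reverse=True, then items[1:]) by repeated
-- first-maximum extraction (selection) and iterates the dict values directly; alternative
-- algorithm of similar cost, return value identical.

-- ===== PORT A =====
-- `tag.index(' ') if ' ' in tag else None` — under the `' ' in tag` guard str.index equals str.find
def space_pos_py (tag : String) : Option Int :=
  if PySem.Str.isIn " " tag then some (PySem.Str.find tag " ") else none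

def is_ambiguous_py (tags : List String) (skip_space_ambiguity : Bool) : Bool :=
  if tags.length < 2 then false
  else
    if skip_space_ambiguity then
      let space_pos := tags.map space_pos_py
      if space_pos.length == (PySem.Set.ofList space_pos).length then false
      else true
    else true

def get_duplicate_tag_replaces_py (spellings : List (String × List (String × Int))) (skip_space_ambiguity : Bool) : List (String × String) :=
  -- the Python function receives dicts; rebuild them from the association lists
  let d : PySem.Dict String (PySem.Dict String Int) :=
    PySem.Dict.ofList (spellings.map (fun p => (p.1, PySem.Dict.ofList p.2)))
  let replaces : PySem.Dict String String :=
    (PySem.Dict.keys d).foldl (fun replaces grammemes =>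
      let tags := PySem.Dict.getD d grammemes PySem.Dict.empty
      if is_ambiguous_py (PySem.Dict.keys tags) skip_space_ambiguity then
        let items := PySem.List.sorted (PySem.Dict.items tags) (fun it => it.2) true
        let top_tag := (PySem.List.pyGetD items 0 ("", 0)).1  -- items[0][0]; items ≠ [] under the guard
        (PySem.List.slice items (some 1) none).foldl          -- items[1:]
          (fun r p => PySem.Dict.insert r p.1 top_tag) replaces
      else replaces) PySem.Dict.empty
  replaces.items

-- ===== PORT B =====
def pop_first_max (items : List (String × Int)) : (String × Int) × List (String × Int) :=
  let b := (PySem.List.pyRange 1 items.length 1).foldl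
    (fun b i => if (PySem.List.pyGetD items i ("", 0)).2 > (PySem.List.pyGetD items b ("", 0)).2 then i else b)
    (0 : Int)
  match PySem.List.pop? items b with
  | some r => r
  | none => (("", 0), [])   -- unreachable: b is a valid index of a nonempty list

-- termination measure for emit_replaces (cited by decreasing_by, hence above the port)
theorem pop_match_length_lt (items : List (String × Int)) (h : items ≠ []) (i : Int) :
    (match PySem.List.pop? items i with
      | some r => r
      | none => ((("" : String), (0 : Int)), ([] : List (String × Int)))).2.length < items.length := by
  rcases hp : PySem.List.pop? items i with _ | r
  · simpa using List.length_pos_iff.mpr h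
  · have := PySem.List.length_of_pop?_eq_some items hp
    show r.2.length < items.length
    omega

theorem pop_first_max_length_lt (items : List (String × Int)) (h : items ≠ []) :
    (pop_first_max items).2.length < items.length :=
  pop_match_length_lt items h _

def emit_replaces (top_tag : String) (r : PySem.Dict String String) (items : List (String × Int)) : PySem.Dict String String :=
  if h : items = [] then r
  else
    let p := pop_first_max items
    emit_replaces top_tag (PySem.Dict.insert r p.1.1 top_tag) p.2
termination_by items.length
decreasing_by exact pop_first_max_length_lt items h

def get_duplicate_tag_replaces_py_alt (spellings : List (String × List (String × Int))) (skip_space_ambiguity : Bool) : List (String × String) :=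
  let d : PySem.Dict String (PySem.Dict String Int) :=
    PySem.Dict.ofList (spellings.map (fun p => (p.1, PySem.Dict.ofList p.2)))
  let replaces : PySem.Dict String String :=
    (PySem.Dict.values d).foldl (fun replaces tags =>
      if is_ambiguous_py (PySem.Dict.keys tags) skip_space_ambiguity then
        let first := pop_first_max (PySem.Dict.items tags)
        emit_replaces first.1.1 replaces first.2
      else replaces) PySem.Dict.empty
  replaces.items

-- ===== PRECONDITION & SPEC =====
def Spec_get_duplicate_tag_replaces_py (spellings : List (String × List (String × Int))) (skip_space_ambiguity : Bool) (out : List (String × String)) : Prop := out = get_duplicate_tag_replaces_py_alt spellings skip_space_ambiguity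
instance (spellings : List (String × List (String × Int))) (skip_space_ambiguity : Bool) (out : List (String × String)) : Decidable (Spec_get_duplicate_tag_replaces_py spellings skip_space_ambiguity out) := by unfold Spec_get_duplicate_tag_replaces_py; infer_instance

-- ===== CLAIM (what is proved, stated in full; the proofs are below) =====
def Claim_equal_get_duplicate_tag_replaces_py : Prop := ∀ (spellings : List (String × List (String × Int))) (skip_space_ambiguity : Bool), Dom_get_duplicate_tag_replaces_py spellings skip_space_ambiguity → Spec_get_duplicate_tag_replaces_py spellings skip_space_ambiguity (get_duplicate_tag_replaces_py spellings skip_space_ambiguity)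

-- ===== LEMMAS AND PROOFS =====

-- the index fold of pop_first_max
def bidxFold (items : List (String × Int)) : Int :=
  (PySem.List.pyRange 1 items.length 1).foldl
    (fun b i => if (PySem.List.pyGetD items i ("", 0)).2 > (PySem.List.pyGetD items b ("", 0)).2 then i else b)
    (0 : Int)

theorem bidx_aux_range (items : List (String × Int)) (n : Int) (l : List Int) (b0 : Int)
    (hb : 0 ≤ b0 ∧ b0 < n) (hl : ∀ i ∈ l, 0 ≤ i ∧ i < n) :
    0 ≤ l.foldl (fun b i => if (PySem.List.pyGetD items i ("", 0)).2 > (PySem.List.pyGetD items b ("", 0)).2 then i else b) b0 ∧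
    l.foldl (fun b i => if (PySem.List.pyGetD items i ("", 0)).2 > (PySem.List.pyGetD items b ("", 0)).2 then i else b) b0 < n := by
  induction l generalizing b0 with
  | nil => exact hb
  | cons i t ih =>
      simp only [List.foldl_cons]
      apply ih
      · split_ifs
        · exact hl i List.mem_cons_self
        · exact hb
      · exact fun j hj => hl j (List.mem_cons_of_mem i hj)

theorem bidxFold_range (items : List (String × Int)) (h : items ≠ []) :
    0 ≤ bidxFold items ∧ bidxFold items < items.length := by
  have h0 : 0 < items.length := List.length_pos_iff.mpr h
  exact bidx_aux_range items items.length _ 0 (by constructor <;> omega)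
    (fun i hi => by have := PySem.List.mem_pyRange_one.mp hi; omega)

theorem pyGetD_append_left (ys : List (String × Int)) (y : String × Int) (j : Int) (d : String × Int)
    (h0 : 0 ≤ j) (h1 : j < ys.length) :
    PySem.List.pyGetD (ys ++ [y]) j d = PySem.List.pyGetD ys j d := by
  rw [PySem.List.pyGetD_eq_getElem _ d h0 (by simp; omega),
      PySem.List.pyGetD_eq_getElem _ d h0 h1]
  exact List.getElem_append_left (by omega)

theorem bidx_aux_congr (ys : List (String × Int)) (y : String × Int) (l : List Int) (b0 : Int)
    (hb : 0 ≤ b0 ∧ b0 < ys.length) (hl : ∀ i ∈ l, 0 ≤ i ∧ i < ys.length) :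
    l.foldl (fun b i => if (PySem.List.pyGetD (ys ++ [y]) i ("", 0)).2 > (PySem.List.pyGetD (ys ++ [y]) b ("", 0)).2 then i else b) b0 =
    l.foldl (fun b i => if (PySem.List.pyGetD ys i ("", 0)).2 > (PySem.List.pyGetD ys b ("", 0)).2 then i else b) b0 := by
  induction l generalizing b0 with
  | nil => rfl
  | cons i t ih =>
      have hi := hl i List.mem_cons_self
      simp only [List.foldl_cons]
      rw [pyGetD_append_left ys y i _ hi.1 hi.2, pyGetD_append_left ys y b0 _ hb.1 hb.2]
      rw [ih]
      · split_ifs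
        · exact ⟨hi.1, hi.2⟩
        · exact hb
      · exact fun j hj => hl j (List.mem_cons_of_mem i hj)

-- appending an element only changes the selected index if the new element is strictly larger
theorem bidxFold_append (ys : List (String × Int)) (y : String × Int) (h : ys ≠ []) :
    bidxFold (ys ++ [y]) =
      if y.2 > (PySem.List.pyGetD ys (bidxFold ys) ("", 0)).2 then (ys.length : Int) else bidxFold ys := by
  have h0 : 0 < ys.length := List.length_pos_iff.mpr h
  have hrange := bidxFold_range ys h
  have step1 : bidxFold (ys ++ [y]) =
      List.foldl (fun b i => if (PySem.List.pyGetD (ys ++ [y]) i ("", 0)).2 > (PySem.List.pyGetD (ys ++ [y]) b ("", 0)).2 then i else b)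
        0 (PySem.List.pyRange 1 (ys.length : Int) ++ [(ys.length : Int)]) := by
    unfold bidxFold
    rw [show (((ys ++ [y]).length : Nat) : Int) = (ys.length : Int) + 1 from by simp,
        PySem.List.pyRange_one_succ_right (by omega : (1 : Int) ≤ ys.length)]
  have step2 : List.foldl (fun b i => if (PySem.List.pyGetD (ys ++ [y]) i ("", 0)).2 > (PySem.List.pyGetD (ys ++ [y]) b ("", 0)).2 then i else b)
      0 (PySem.List.pyRange 1 (ys.length : Int)) = bidxFold ys := by
    unfold bidxFold
    exact bidx_aux_congr ys y _ 0 ⟨le_refl 0, by omega⟩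
      (fun i hi => by have := PySem.List.mem_pyRange_one.mp hi; omega)
  rw [List.foldl_append, step2] at step1
  simp only [List.foldl_cons, List.foldl_nil] at step1
  rw [step1, pyGetD_append_left ys y _ _ hrange.1 hrange.2]
  rw [PySem.List.pyGetD_eq_getElem (ys ++ [y]) ("", 0) (by omega) (by simp)]
  simp only [Int.toNat_natCast]
  simp

theorem pop_first_max_eq (items : List (String × Int)) (h : items ≠ []) :
    ∃ (b : Nat) (hb : b < items.length), bidxFold items = (b : Int) ∧
      pop_first_max items = (items[b]'hb, items.eraseIdx b) := by
  have hrange := bidxFold_range items h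
  obtain ⟨b, hbnat⟩ : ∃ b : Nat, bidxFold items = (b : Int) := ⟨(bidxFold items).toNat, by omega⟩
  have hb : b < items.length := by omega
  refine ⟨b, hb, hbnat, ?_⟩
  have hdef : pop_first_max items =
      (match PySem.List.pop? items (bidxFold items) with
        | some r => r
        | none => ((("" : String), (0 : Int)), ([] : List (String × Int)))) := rfl
  rw [hdef, hbnat, PySem.List.pop?_natCast items b hb]

theorem insertBy_cons (bef : (String × Int) → (String × Int) → Bool) (x y : String × Int) (ys : List (String × Int)) :
    PySem.List.insertBy bef x (y :: ys) =
      if bef x y then x :: y :: ys else y :: PySem.List.insertBy bef x ys := rfl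

theorem sorted_append_singleton (xs : List (String × Int)) (y : String × Int) :
    PySem.List.sorted (xs ++ [y]) (fun it => it.2) true =
      PySem.List.insertBy (fun a b => decide (b.2 < a.2)) y (PySem.List.sorted xs (fun it => it.2) true) := by
  rw [PySem.List.sorted_rev_eq_foldl_insertBy, PySem.List.sorted_rev_eq_foldl_insertBy, List.foldl_append]
  rfl

-- the key fact: extracting the first maximum takes the head off the stable descending sort
theorem sorted_rev_eq_pop_first_max (items : List (String × Int)) (h : items ≠ []) :
    PySem.List.sorted items (fun it => it.2) true =
      (pop_first_max items).1 :: PySem.List.sorted (pop_first_max items).2 (fun it => it.2) true ∧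
    (∀ z ∈ items, z.2 ≤ (pop_first_max items).1.2) := by
  induction items using List.reverseRecOn with
  | nil => exact absurd rfl h
  | append_singleton ys y ih =>
      by_cases hys : ys = []
      · subst hys
        simp only [List.nil_append]
        have hpop : pop_first_max [y] = (y, []) := rfl
        rw [hpop]
        refine ⟨rfl, ?_⟩
        intro z hz
        simp at hz
        simp [hz]
      · obtain ⟨hsor, hmax⟩ := ih hys
        obtain ⟨b, hb, hbnat, hpop⟩ := pop_first_max_eq ys hys
        have hgetb : PySem.List.pyGetD ys (bidxFold ys) ("", 0) = ys[b]'hb := by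
          rw [hbnat, PySem.List.pyGetD_eq_getElem ys ("", 0) (by omega) (by omega)]
          simp
        have happ := bidxFold_append ys y hys
        rw [hgetb] at happ
        have hm1 : (pop_first_max ys).1 = ys[b]'hb := by rw [hpop]
        by_cases hgt : y.2 > (ys[b]'hb).2
        · -- the new element is a strictly larger maximum
          rw [if_pos hgt] at happ
          have hpop' : pop_first_max (ys ++ [y]) = (y, ys) := by
            obtain ⟨b', hb', hbnat', hpop'⟩ := pop_first_max_eq (ys ++ [y]) (by simp)
            have : b' = ys.length := by rw [happ] at hbnat'; omega
            subst this
            rw [hpop']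
            congr 1
            · exact List.getElem_concat_length rfl _
            · rw [List.eraseIdx_eq_take_drop_succ]
              simp
          rw [hpop']
          constructor
          · rw [sorted_append_singleton, hsor, insertBy_cons,
                if_pos (by rw [hm1]; simpa using hgt), ← hsor]
          · intro z hz
            rcases List.mem_append.mp hz with hz | hz
            · have := hmax z hz
              rw [hm1] at this
              simp only []
              omega
            · simp at hz; simp [hz]
        · -- the old first maximum stays the first maximum
          rw [if_neg hgt] at happ
          have hpop' : pop_first_max (ys ++ [y]) = (ys[b]'hb, (pop_first_max ys).2 ++ [y]) := by
            obtain ⟨b', hb', hbnat', hpop'⟩ := pop_first_max_eq (ys ++ [y]) (by simp)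
            have : b' = b := by rw [happ, hbnat] at hbnat'; omega
            subst this
            rw [hpop']
            congr 1
            · exact List.getElem_append_left hb
            · rw [hpop, List.eraseIdx_append_of_lt_length hb]
          rw [hpop']
          constructor
          · rw [sorted_append_singleton, hsor, insertBy_cons,
                if_neg (by rw [hm1]; simpa using hgt), sorted_append_singleton, hm1]
          · intro z hz
            rcases List.mem_append.mp hz with hz | hz
            · have := hmax z hz
              rw [hm1] at this
              exact this
            · simp at hz
              subst hz
              simp only []
              omega

theorem emit_replaces_eq_aux (top_tag : String) :
    ∀ (n : Nat) (items : List (String × Int)), items.length ≤ n → ∀ (r : PySem.Dict String String),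
      emit_replaces top_tag r items =
        (PySem.List.sorted items (fun it => it.2) true).foldl
          (fun r p => PySem.Dict.insert r p.1 top_tag) r := by
  intro n
  induction n with
  | zero =>
      intro items hlen r
      have : items = [] := by
        cases items with
        | nil => rfl
        | cons a t => simp at hlen
      subst this
      rw [emit_replaces, show PySem.List.sorted ([] : List (String × Int)) (fun it => it.2) true = [] from rfl]
      simp
  | succ n ih =>
      intro items hlen r
      by_cases h : items = []
      · subst h
        rw [emit_replaces, show PySem.List.sorted ([] : List (String × Int)) (fun it => it.2) true = [] from rfl]
        simp
      · rw [emit_replaces]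
        simp only [dif_neg h]
        obtain ⟨hsor, _⟩ := sorted_rev_eq_pop_first_max items h
        have hlt := pop_first_max_length_lt items h
        rw [ih (pop_first_max items).2 (by omega)]
        rw [hsor, List.foldl_cons]

theorem emit_replaces_eq (top_tag : String) (items : List (String × Int)) (r : PySem.Dict String String) :
    emit_replaces top_tag r items =
      (PySem.List.sorted items (fun it => it.2) true).foldl
        (fun r p => PySem.Dict.insert r p.1 top_tag) r :=
  emit_replaces_eq_aux top_tag items.length items (le_refl _) r

-- per-group equality of the two fold bodies
theorem group_step_eq (skip : Bool) (tags : PySem.Dict String Int) (replaces : PySem.Dict String String) :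
    (if is_ambiguous_py (PySem.Dict.keys tags) skip then
        (PySem.List.slice (PySem.List.sorted (PySem.Dict.items tags) (fun it => it.2) true) (some 1) none).foldl
          (fun r p => PySem.Dict.insert r p.1
            ((PySem.List.pyGetD (PySem.List.sorted (PySem.Dict.items tags) (fun it => it.2) true) 0 ("", 0)).1)) replaces
      else replaces) =
    (if is_ambiguous_py (PySem.Dict.keys tags) skip then
        emit_replaces (pop_first_max (PySem.Dict.items tags)).1.1 replaces (pop_first_max (PySem.Dict.items tags)).2
      else replaces) := by
  by_cases hg : is_ambiguous_py (PySem.Dict.keys tags) skip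
  · rw [if_pos hg, if_pos hg]
    have hlen : ¬ ((PySem.Dict.keys tags).length < 2) := by
      intro hlt
      unfold is_ambiguous_py at hg
      rw [if_pos hlt] at hg
      simp at hg
    have hkeys : (PySem.Dict.keys tags).length = (PySem.Dict.items tags).length := by
      simp [PySem.Dict.keys]
    have hne : PySem.Dict.items tags ≠ [] := by
      intro he
      apply hlen
      rw [hkeys, he]
      simp
    obtain ⟨hsor, _⟩ := sorted_rev_eq_pop_first_max (PySem.Dict.items tags) hne
    rw [PySem.List.slice_from _ (by norm_num : (0 : Int) ≤ 1), hsor,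
        PySem.List.pyGetD_zero_cons, emit_replaces_eq]
    simp [Int.toNat_one]
  · rw [if_neg hg, if_neg hg]

-- the two outer folds agree: A walks the keys and looks each one up, B walks the values
theorem outer_eq (d : PySem.Dict String (PySem.Dict String Int)) (hnd : (PySem.Dict.keys d).Nodup) (skip : Bool) :
    ((PySem.Dict.keys d).foldl (fun replaces grammemes =>
      let tags := PySem.Dict.getD d grammemes PySem.Dict.empty
      if is_ambiguous_py (PySem.Dict.keys tags) skip then
        let items := PySem.List.sorted (PySem.Dict.items tags) (fun it => it.2) true
        let top_tag := (PySem.List.pyGetD items 0 ("", 0)).1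
        (PySem.List.slice items (some 1) none).foldl
          (fun r p => PySem.Dict.insert r p.1 top_tag) replaces
      else replaces) PySem.Dict.empty).items =
    ((PySem.Dict.values d).foldl (fun replaces tags =>
      if is_ambiguous_py (PySem.Dict.keys tags) skip then
        let first := pop_first_max (PySem.Dict.items tags)
        emit_replaces first.1.1 replaces first.2
      else replaces) PySem.Dict.empty).items := by
  have hv : PySem.Dict.values d = (PySem.Dict.items d).map (fun p => p.2) := rfl
  rw [hv, List.foldl_map, PySem.Dict.items_eq_map_keys d hnd PySem.Dict.empty, List.foldl_map]
  congr 1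
  exact PySem.List.foldl_congr_mem (PySem.Dict.keys d) _ _ PySem.Dict.empty
    (fun acc x _ => group_step_eq skip (PySem.Dict.getD d x PySem.Dict.empty) acc)

-- ===== VERDICT (by name: the statement is the Claim_ definition above) =====
set_option maxHeartbeats 1000000 in
theorem get_duplicate_tag_replaces_py_spec : Claim_equal_get_duplicate_tag_replaces_py := by
  intro spellings skip _
  unfold Spec_get_duplicate_tag_replaces_py
  simp only [get_duplicate_tag_replaces_py, get_duplicate_tag_replaces_py_alt]
  exact outer_eq (PySem.Dict.ofList (spellings.map (fun p => (p.1, PySem.Dict.ofList p.2))))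
    (PySem.Dict.nodup_keys_ofList _) skip
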